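-- pv_equiv track=rewrite | github.com/langtuananh2424/lap_trinh_python | fibochan.py | isEvenFibonacciNumber
-- ===== SOURCE A (Python) =====
-- def isEvenFibonacciNumber(n):
--     a, b = 0, 1
--     while b <= n:
--         if b % 2 == 0:
--             if b == n:
--                 return True
--             else:
--                 a, b = b, a + b
--         else:
--             a, b = b, a + b
--     return False
-- ===== SOURCE B (Python) =====
-- def isEvenFibonacciNumber(n):
--     # materialize the even Fibonacci numbers up to n via E(k) = 4*E(k-1) + E(k-2),
--     # then answer with a membership test
--     evens = []
--     a, b = 0, 2
--     while b <= n: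
--         evens.append(b)
--         a, b = b, 4 * b + a
--     return n in evens
-- ===== Notes on version B (the rewrite author's own statement) =====
-- stated objective: alternative
-- what changed: B never enumerates or parity-tests odd Fibonacci numbers: it builds the list of even Fibonacci numbers up to n directly via the even-subsequence recurrence (each even Fibonacci number is four times the previous even one plus the one before that) and answers with a membership test, replacing A's scan-with-parity-branch boolean loop.
import Mathlib
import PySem

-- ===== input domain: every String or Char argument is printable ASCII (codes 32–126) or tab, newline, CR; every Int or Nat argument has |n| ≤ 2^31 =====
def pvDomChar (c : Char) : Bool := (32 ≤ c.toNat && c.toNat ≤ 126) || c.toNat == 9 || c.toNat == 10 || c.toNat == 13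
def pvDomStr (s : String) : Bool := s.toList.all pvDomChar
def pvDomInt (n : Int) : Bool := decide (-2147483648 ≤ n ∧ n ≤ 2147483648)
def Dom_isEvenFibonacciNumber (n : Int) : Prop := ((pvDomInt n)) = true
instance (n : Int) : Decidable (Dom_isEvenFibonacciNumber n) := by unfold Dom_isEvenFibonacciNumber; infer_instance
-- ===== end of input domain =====

-- B materializes the even Fibonacci numbers up to n via E(k)=4*E(k-1)+E(k-2) and answers by membership; no parity test, no boolean scan loop.

-- ===== PORT A =====
-- A's while loop as fuel-guarded recursion; fuel 60 exceeds the ≤ 47 iterations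
-- possible for n ≤ 2^31 (fib 61 > 2^31), so the guard never fires on Dom.
def pvLoopA (fuel : Nat) (a b n : Int) : Bool :=
  match fuel with
  | 0 => false
  | f + 1 =>
    if b ≤ n then
      if PySem.Int.mod b 2 = 0 then
        if b = n then true
        else pvLoopA f b (a + b) n
      else pvLoopA f b (a + b) n
    else false

def isEvenFibonacciNumber (n : Int) : Bool := pvLoopA 60 0 1 n

-- ===== PORT B =====
-- B's list-building while loop as fuel-guarded recursion returning the list of
-- even Fibonacci numbers ≤ n; fuel 25 exceeds the ≤ 16 iterations possible for
-- n ≤ 2^31 (fib 78 > 2^31), so the guard never fires on Dom.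
def pvEvensB (fuel : Nat) (a b n : Int) : List Int :=
  match fuel with
  | 0 => []
  | f + 1 => if b ≤ n then b :: pvEvensB f b (4 * b + a) n else []

def isEvenFibonacciNumber_alt (n : Int) : Bool := (pvEvensB 25 0 2 n).contains n

-- ===== PRECONDITION & SPEC =====
def Spec_isEvenFibonacciNumber (n : Int) (out : Bool) : Prop := out = isEvenFibonacciNumber_alt n
instance (n : Int) (out : Bool) : Decidable (Spec_isEvenFibonacciNumber n out) := by unfold Spec_isEvenFibonacciNumber; infer_instance

-- ===== CLAIM (what is proved, stated in full; the proofs are below) =====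
def Claim_equal_isEvenFibonacciNumber : Prop := ∀ (n : Int), Dom_isEvenFibonacciNumber n → Spec_isEvenFibonacciNumber n (isEvenFibonacciNumber n)

-- ===== LEMMAS AND PROOFS =====

-- fib parity has period 3: fib j is even iff 3 ∣ j
theorem pv_fib_mod_two (j : Nat) : Nat.fib j % 2 = if j % 3 = 0 then 0 else 1 := by
  induction j using Nat.strong_induction_on with
  | _ j ih =>
    match j with
    | 0 => decide
    | 1 => decide
    | 2 => decide
    | m + 3 =>
      have h1 : Nat.fib (m + 2) = Nat.fib m + Nat.fib (m + 1) := Nat.fib_add_two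
      have h2 : Nat.fib (m + 3) = Nat.fib (m + 1) + Nat.fib (m + 2) := Nat.fib_add_two
      have := ih m (by omega)
      have h3 : (m + 3) % 3 = m % 3 := by omega
      rw [h3, h2, h1]
      omega

theorem pv_fib_even_iff (j : Nat) : 2 ∣ Nat.fib j ↔ 3 ∣ j := by
  have := pv_fib_mod_two j
  constructor <;> intro h
  · by_contra h3
    rw [if_neg (by omega)] at this
    omega
  · rw [if_pos (by omega)] at this
    omega

-- the even-Fibonacci recurrence fib (m+6) = 4 * fib (m+3) + fib m
theorem pv_fib_rec6 (m : Nat) : Nat.fib (m + 6) = 4 * Nat.fib (m + 3) + Nat.fib m := by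
  have h2 : Nat.fib (m + 2) = Nat.fib m + Nat.fib (m + 1) := Nat.fib_add_two
  have h3 : Nat.fib (m + 3) = Nat.fib (m + 1) + Nat.fib (m + 2) := Nat.fib_add_two
  have h4 : Nat.fib (m + 4) = Nat.fib (m + 2) + Nat.fib (m + 3) := Nat.fib_add_two
  have h5 : Nat.fib (m + 5) = Nat.fib (m + 3) + Nat.fib (m + 4) := Nat.fib_add_two
  have h6 : Nat.fib (m + 6) = Nat.fib (m + 4) + Nat.fib (m + 5) := Nat.fib_add_two
  omega

-- loop A from state (fib (k-1), fib k) finds n iff n is an even fib with index ≥ k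
theorem pv_loopA_char (f : Nat) : ∀ (k : Nat) (n : Int), 1 ≤ k → (n : Int) < (Nat.fib (k + f) : Int) →
    (pvLoopA f (Nat.fib (k - 1)) (Nat.fib k) n = true ↔
      ∃ j, k ≤ j ∧ (Nat.fib j : Int) = n ∧ 2 ∣ Nat.fib j) := by
  induction f with
  | zero =>
    intro k n hk hlt
    simp only [pvLoopA]
    constructor
    · intro h; cases h
    · rintro ⟨j, hj, hfib, _⟩
      have : Nat.fib k ≤ Nat.fib j := Nat.fib_mono hj
      simp only [Nat.add_zero] at hlt
      omega
  | succ f ih =>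
    intro k n hk hlt
    have hsum : (Nat.fib (k - 1) : Int) + (Nat.fib k : Int) = (Nat.fib (k + 1) : Int) := by
      have : Nat.fib (k - 1) + Nat.fib k = Nat.fib (k + 1) := by
        have h := @Nat.fib_add_two (k - 1)
        have e1 : k - 1 + 2 = k + 1 := by omega
        have e2 : k - 1 + 1 = k := by omega
        rw [e1, e2] at h
        omega
      exact_mod_cast this
    have hmod : PySem.Int.mod (Nat.fib k : Int) 2 = 0 ↔ 2 ∣ Nat.fib k := by
      rw [PySem.Int.mod_eq_zero_iff_dvd]
      exact_mod_cast Int.natCast_dvd_natCast (m := 2) (n := Nat.fib k)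
    have hrec : pvLoopA f (Nat.fib k) (Nat.fib (k - 1) + Nat.fib k) n = true ↔
        ∃ j, k + 1 ≤ j ∧ (Nat.fib j : Int) = n ∧ 2 ∣ Nat.fib j := by
      have e : ((k + 1) - 1) = k := by omega
      have := ih (k + 1) n (by omega) (by
        have e2 : k + 1 + f = k + (f + 1) := by omega
        rw [e2]; exact hlt)
      rw [e] at this
      rw [show (Nat.fib (k - 1) : Int) + (Nat.fib k : Int) = ((Nat.fib (k + 1) : Nat) : Int) by exact_mod_cast hsum]
      exact this
    simp only [pvLoopA]
    split_ifs with hle heven heq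
    · -- fib k ≤ n, even, fib k = n: found
      simp only [true_iff]
      exact ⟨k, le_refl k, heq, hmod.mp heven⟩
    · -- fib k ≤ n, even, fib k ≠ n: recurse
      rw [hrec]
      constructor
      · rintro ⟨j, hj, h⟩; exact ⟨j, by omega, h⟩
      · rintro ⟨j, hj, hfib, hd⟩
        refine ⟨j, ?_, hfib, hd⟩
        rcases Nat.eq_or_lt_of_le hj with h | h
        · exact absurd (h ▸ hfib) heq
        · omega
    · -- fib k ≤ n, odd: recurse; j = k impossible since fib k odd
      rw [hrec]
      constructor
      · rintro ⟨j, hj, h⟩; exact ⟨j, by omega, h⟩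
      · rintro ⟨j, hj, hfib, hd⟩
        refine ⟨j, ?_, hfib, hd⟩
        rcases Nat.eq_or_lt_of_le hj with h | h
        · exact absurd (h ▸ hd) (hmod.not.mp heven)
        · omega
    · -- n < fib k: no fib with index ≥ k can equal n
      simp only [false_iff]
      rintro ⟨j, hj, hfib, _⟩
      have : Nat.fib k ≤ Nat.fib j := Nat.fib_mono hj
      omega

-- B's list from state (fib (3k-3), fib (3k)) contains n iff n = fib (3j) for some j ≥ k
theorem pv_evensB_mem (f : Nat) : ∀ (k : Nat) (n : Int), 1 ≤ k → (n : Int) < (Nat.fib (3 * (k + f)) : Int) →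
    (n ∈ pvEvensB f (Nat.fib (3 * k - 3)) (Nat.fib (3 * k)) n ↔
      ∃ j, k ≤ j ∧ (Nat.fib (3 * j) : Int) = n) := by
  induction f with
  | zero =>
    intro k n hk hlt
    simp only [pvEvensB, List.not_mem_nil, false_iff]
    rintro ⟨j, hj, hfib⟩
    have : Nat.fib (3 * k) ≤ Nat.fib (3 * j) := Nat.fib_mono (by omega)
    simp only [Nat.add_zero] at hlt
    omega
  | succ f ih =>
    intro k n hk hlt
    have hstep : 4 * (Nat.fib (3 * k) : Int) + (Nat.fib (3 * k - 3) : Int) = (Nat.fib (3 * (k + 1)) : Int) := by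
      have h := pv_fib_rec6 (3 * k - 3)
      have e1 : 3 * k - 3 + 6 = 3 * (k + 1) := by omega
      have e2 : 3 * k - 3 + 3 = 3 * k := by omega
      rw [e1, e2] at h
      exact_mod_cast (by omega : 4 * Nat.fib (3 * k) + Nat.fib (3 * k - 3) = Nat.fib (3 * (k + 1)))
    have hrec : n ∈ pvEvensB f (Nat.fib (3 * k)) (4 * (Nat.fib (3 * k) : Int) + (Nat.fib (3 * k - 3) : Int)) n ↔
        ∃ j, k + 1 ≤ j ∧ (Nat.fib (3 * j) : Int) = n := by
      have e : 3 * (k + 1) - 3 = 3 * k := by omega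
      have := ih (k + 1) n (by omega) (by
        have e2 : 3 * (k + 1 + f) = 3 * (k + (f + 1)) := by omega
        rw [e2]; exact hlt)
      rw [e] at this
      rw [show 4 * (Nat.fib (3 * k) : Int) + (Nat.fib (3 * k - 3) : Int) = ((Nat.fib (3 * (k + 1)) : Nat) : Int) by exact_mod_cast hstep]
      exact this
    simp only [pvEvensB]
    split_ifs with hle
    · rw [List.mem_cons, hrec]
      constructor
      · rintro (h | ⟨j, hj, hfib⟩)
        · exact ⟨k, le_refl k, h.symm⟩
        · exact ⟨j, by omega, hfib⟩
      · rintro ⟨j, hj, hfib⟩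
        rcases Nat.eq_or_lt_of_le hj with h | h
        · exact Or.inl (h ▸ hfib).symm
        · exact Or.inr ⟨j, by omega, hfib⟩
    · simp only [List.not_mem_nil, false_iff]
      rintro ⟨j, hj, hfib⟩
      have : Nat.fib (3 * k) ≤ Nat.fib (3 * j) := Nat.fib_mono (by omega)
      omega

theorem pv_fib61_big : (2147483648 : Int) < (Nat.fib 61 : Int) := by norm_num [Nat.fib]

theorem pv_fib78_big : (2147483648 : Int) < (Nat.fib 78 : Int) := by norm_num [Nat.fib]

-- ===== VERDICT (by name: the statement is the Claim_ definition above) =====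
theorem isEvenFibonacciNumber_spec : Claim_equal_isEvenFibonacciNumber := by
  intro n hd
  unfold Spec_isEvenFibonacciNumber isEvenFibonacciNumber isEvenFibonacciNumber_alt
  simp only [Dom_isEvenFibonacciNumber, pvDomInt, decide_eq_true_eq] at hd
  have hA := pv_loopA_char 60 1 n (by omega) (by
    have := pv_fib61_big
    simp only [show (1 : Nat) + 60 = 61 from rfl]
    omega)
  have hB := pv_evensB_mem 25 1 n (by omega) (by
    have := pv_fib78_big
    simp only [show 3 * (1 + 25) = 78 from rfl]
    omega)
  simp only [show (1 : Nat) - 1 = 0 from rfl,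
    show 3 * 1 = 3 from rfl, Nat.fib_zero, Nat.fib_one] at hA hB
  have key : (∃ j, 1 ≤ j ∧ (Nat.fib j : Int) = n ∧ 2 ∣ Nat.fib j) ↔
      (∃ j, 1 ≤ j ∧ (Nat.fib (3 * j) : Int) = n) := by
    constructor
    · rintro ⟨j, hj, hfib, hd2⟩
      obtain ⟨m, rfl⟩ := (pv_fib_even_iff j).mp hd2
      exact ⟨m, by omega, hfib⟩
    · rintro ⟨j, hj, hfib⟩
      exact ⟨3 * j, by omega, hfib, (pv_fib_even_iff (3 * j)).mpr ⟨j, rfl⟩⟩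
  have h1 : (pvLoopA 60 ((Nat.fib 0 : Nat) : Int) ((Nat.fib 1 : Nat) : Int) n = true) ↔
      ((pvEvensB 25 ((Nat.fib 0 : Nat) : Int) ((Nat.fib 3 : Nat) : Int) n).contains n = true) := by
    rw [List.contains_iff_mem]
    simp only [Nat.fib_zero, Nat.fib_one]
    exact hA.trans (key.trans hB.symm)
  have e3 : (Nat.fib 3 : Int) = 2 := by norm_num [Nat.fib]
  rw [show (0 : Int) = ((Nat.fib 0 : Nat) : Int) by simp, show (1 : Int) = ((Nat.fib 1 : Nat) : Int) by simp,
    show (2 : Int) = ((Nat.fib 3 : Nat) : Int) from e3.symm]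
  exact Bool.eq_iff_iff.mpr h1
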